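-- pv_equiv track=rewrite | github.com/qianchu/rare_we | eval/ner_eval.py | return_tag_position
-- ===== SOURCE A (Python) =====
-- def return_tag_position(tagged_sent):
--     tags_position=[]
--     flag_tag_found=False
--     for position,word_tag in enumerate(tagged_sent):
--         if word_tag[1]!=u'O':
--             if not flag_tag_found:
--                 start=position
--                 flag_tag_found=True
--         else:
--             if flag_tag_found:
--                 tags_position .append((start,position))
--                 flag_tag_found=False
--     # if flag_tag_found:
--     #     tags_position.append((start,position+1))
--     return tags_position
-- ===== SOURCE B (Python) =====
-- def return_tag_position(tagged_sent):
--     # Edge detection: pair each tag with its predecessor ('O' before the first),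
--     # collect rising edges as starts and falling edges as ends, zip them.
--     # zip truncation drops a trailing unterminated run, as intended.
--     tags = [t for _, t in tagged_sent]
--     prev = ['O'] + tags[:-1]
--     pt = list(zip(prev, tags))
--     starts = [i for i, (p, t) in enumerate(pt) if t != 'O' and p == 'O']
--     ends = [i for i, (p, t) in enumerate(pt) if t == 'O' and p != 'O']
--     return list(zip(starts, ends))
-- ===== Notes on version B (the rewrite author's own statement) =====
-- stated objective: alternative
-- what changed: Replaced A's single flag-driven state-machine loop (carrying flag_tag_found and start) by edge detection: pair each tag with its predecessor via a shifted zip, collect rising edges as starts and falling edges as ends in two comprehensions, and zip them (zip truncation reproduces A's dropped trailing run).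
import Mathlib
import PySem

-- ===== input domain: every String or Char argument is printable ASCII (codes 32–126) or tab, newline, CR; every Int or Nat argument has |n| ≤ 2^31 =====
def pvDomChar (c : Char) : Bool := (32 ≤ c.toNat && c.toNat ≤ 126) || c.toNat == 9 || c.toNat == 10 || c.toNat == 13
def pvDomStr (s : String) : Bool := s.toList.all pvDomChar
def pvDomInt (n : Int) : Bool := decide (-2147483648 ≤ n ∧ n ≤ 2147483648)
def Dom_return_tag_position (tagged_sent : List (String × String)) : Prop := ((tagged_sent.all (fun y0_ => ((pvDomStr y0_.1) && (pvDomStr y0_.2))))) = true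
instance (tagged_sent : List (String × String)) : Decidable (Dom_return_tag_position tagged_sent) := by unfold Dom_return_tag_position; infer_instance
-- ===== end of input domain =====

-- B replaces A's flag-carrying state-machine loop by shifted-zip edge detection (starts/ends lists zipped); same cost, different decomposition.

-- ===== PORT A =====
-- loop body of A: state = (tags_position, flag_tag_found, start); start=0 stands for Python's not-yet-assigned 'start' (only read after it is set)
def pvStepA (st : List (Int × Int) × Bool × Int) (pw : Int × String × String) : List (Int × Int) × Bool × Int :=
  let tags_position := st.1
  let flag_tag_found := st.2.1
  let start := st.2.2
  if pw.2.2 ≠ "O" then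
    if ¬ flag_tag_found then (tags_position, true, pw.1)
    else (tags_position, flag_tag_found, start)
  else
    if flag_tag_found then (tags_position ++ [(start, pw.1)], false, start)
    else (tags_position, flag_tag_found, start)

def return_tag_position (tagged_sent : List (String × String)) : List (Int × Int) :=
  let res := (PySem.List.enumerate tagged_sent).foldl pvStepA ([], false, 0)
  res.1

-- ===== PORT B =====
def return_tag_position_alt (tagged_sent : List (String × String)) : List (Int × Int) :=
  let tags := tagged_sent.map (fun wt => wt.2)
  let prev := "O" :: tags.dropLast
  let pt := List.zip prev tags
  let starts := (PySem.List.enumerate pt).filterMap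
    (fun ipt => if ipt.2.2 ≠ "O" ∧ ipt.2.1 = "O" then some ipt.1 else none)
  let ends := (PySem.List.enumerate pt).filterMap
    (fun ipt => if ipt.2.2 = "O" ∧ ipt.2.1 ≠ "O" then some ipt.1 else none)
  List.zip starts ends

-- ===== PRECONDITION & SPEC =====
def Spec_return_tag_position (tagged_sent : List (String × String)) (out : List (Int × Int)) : Prop := out = return_tag_position_alt tagged_sent
instance (tagged_sent : List (String × String)) (out : List (Int × Int)) : Decidable (Spec_return_tag_position tagged_sent out) := by unfold Spec_return_tag_position; infer_instance

-- ===== CLAIM (what is proved, stated in full; the proofs are below) =====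
def Claim_equal_return_tag_position : Prop := ∀ (tagged_sent : List (String × String)), Dom_return_tag_position tagged_sent → Spec_return_tag_position tagged_sent (return_tag_position tagged_sent)

-- ===== LEMMAS AND PROOFS =====

-- abstract run-pairing function over the tag list (proof device shared by both sides)
def pvPairsF : List String → Int → Bool → Int → List (Int × Int)
  | [], _, _, _ => []
  | t :: r, p, flag, s =>
    if t ≠ "O" then
      (if flag then pvPairsF r (p + 1) flag s else pvPairsF r (p + 1) true p)
    else
      (if flag then (s, p) :: pvPairsF r (p + 1) false s else pvPairsF r (p + 1) false s)

-- start positions / end positions of runs, given the tag preceding the suffix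
def pvStartsF : List String → Int → String → List Int
  | [], _, _ => []
  | t :: r, p, x => (if t ≠ "O" ∧ x = "O" then [p] else []) ++ pvStartsF r (p + 1) t

def pvEndsF : List String → Int → String → List Int
  | [], _, _ => []
  | t :: r, p, x => (if t = "O" ∧ x ≠ "O" then [p] else []) ++ pvEndsF r (p + 1) t

theorem pvLemA (l : List (String × String)) (p : Int) (acc : List (Int × Int)) (flag : Bool) (start : Int) :
    ((PySem.List.enumerate l p).foldl pvStepA (acc, flag, start)).1
      = acc ++ pvPairsF (l.map (fun wt => wt.2)) p flag start := by
  induction l generalizing p acc flag start with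
  | nil => simp [PySem.List.enumerate_nil, pvPairsF]
  | cons w r ih =>
    rw [PySem.List.enumerate_cons, List.foldl_cons]
    by_cases ht : w.2 ≠ "O"
    · have hs : ∀ f s, pvStepA (acc, f, s) (p, w) =
        (if f then (acc, f, s) else (acc, true, p)) := by
        intro f s; cases f <;> simp [pvStepA, ht]
      cases flag with
      | true => rw [hs]; simp [ih, pvPairsF, ht]
      | false => rw [hs]; simp [ih, pvPairsF, ht]
    · rw [not_ne_iff] at ht
      have hs : ∀ f s, pvStepA (acc, f, s) (p, w) =
        (if f then (acc ++ [(s, p)], false, s) else (acc, false, s)) := by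
        intro f s; cases f <;> simp [pvStepA, ht]
      cases flag with
      | true => rw [hs]; simp [ih, pvPairsF, ht]
      | false => rw [hs]; simp [ih, pvPairsF, ht]

theorem pvZipPrevCons (l : List String) (x t : String) :
    List.zip (x :: (t :: l).dropLast) (t :: l) = (x, t) :: List.zip (t :: l.dropLast) l := by
  cases l <;> simp [List.zip]

theorem pvLemStarts (l : List String) (x : String) (p : Int) :
    (PySem.List.enumerate (List.zip (x :: l.dropLast) l) p).filterMap
      (fun ipt => if ipt.2.2 ≠ "O" ∧ ipt.2.1 = "O" then some ipt.1 else none)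
    = pvStartsF l p x := by
  induction l generalizing x p with
  | nil => simp [PySem.List.enumerate_nil, pvStartsF]
  | cons t r ih =>
    rw [pvZipPrevCons, PySem.List.enumerate_cons, List.filterMap_cons]
    by_cases h : t ≠ "O" ∧ x = "O" <;> simp [h, pvStartsF, ih]

theorem pvLemEnds (l : List String) (x : String) (p : Int) :
    (PySem.List.enumerate (List.zip (x :: l.dropLast) l) p).filterMap
      (fun ipt => if ipt.2.2 = "O" ∧ ipt.2.1 ≠ "O" then some ipt.1 else none)
    = pvEndsF l p x := by
  induction l generalizing x p with
  | nil => simp [PySem.List.enumerate_nil, pvEndsF]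
  | cons t r ih =>
    rw [pvZipPrevCons, PySem.List.enumerate_cons, List.filterMap_cons]
    by_cases h : t = "O" ∧ x ≠ "O" <;> simp [h, pvEndsF, ih]

theorem pvBridge (ts : List String) (p : Int) (flag : Bool) (s : Int) (x : String)
    (hx : flag = true ↔ x ≠ "O") :
    pvPairsF ts p flag s
      = List.zip ((if flag then [s] else []) ++ pvStartsF ts p x) (pvEndsF ts p x) := by
  induction ts generalizing p flag s x with
  | nil => cases flag <;> simp [pvPairsF, pvStartsF, pvEndsF]
  | cons t r ih =>
    by_cases ht : t = "O"
    · subst ht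
      cases flag with
      | true =>
        have hx' : x ≠ "O" := hx.mp rfl
        simp [pvPairsF, pvStartsF, pvEndsF, hx', ih (p + 1) false s "O" (by simp), List.zip]
      | false =>
        have hx' : x = "O" := by
          by_contra h; exact absurd (hx.mpr h) (by simp)
        subst hx'
        simp [pvPairsF, pvStartsF, pvEndsF, ih (p + 1) false s "O" (by simp)]
    · cases flag with
      | true =>
        have hx' : x ≠ "O" := hx.mp rfl
        simp [pvPairsF, pvStartsF, pvEndsF, ht, hx', ih (p + 1) true s t (by simp [ht])]
      | false =>
        have hx' : x = "O" := by
          by_contra h; exact absurd (hx.mpr h) (by simp)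
        subst hx'
        simp [pvPairsF, pvStartsF, pvEndsF, ht, ih (p + 1) true p t (by simp [ht])]

-- ===== VERDICT (by name: the statement is the Claim_ definition above) =====
theorem return_tag_position_spec : Claim_equal_return_tag_position := by
  intro l _
  show return_tag_position l = return_tag_position_alt l
  have hA : return_tag_position l = pvPairsF (l.map (fun wt => wt.2)) 0 false 0 := by
    unfold return_tag_position
    rw [pvLemA]; simp
  have hB : return_tag_position_alt l
      = List.zip (pvStartsF (l.map (fun wt => wt.2)) 0 "O") (pvEndsF (l.map (fun wt => wt.2)) 0 "O") := by
    show List.zip _ _ = _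
    rw [pvLemStarts, pvLemEnds]
  rw [hA, hB]
  simpa using pvBridge (l.map (fun wt => wt.2)) 0 false 0 "O" (by simp)
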